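-- pv_equiv track=rewrite | github.com/Qiskit/qiskit-addon-cutting | evaluator.py | mutate_measurement_basis
-- ===== SOURCE A (Python) =====
-- import itertools, copy, random
--
-- def mutate_measurement_basis(meas):
--     '''
--     I and Z measurement basis correspond to the same logical circuit
--     '''
--     if all(x!='I' for x in meas):
--         return [meas]
--     else:
--         mutated_meas = []
--         for x in meas:
--             if x != 'I':
--                 mutated_meas.append([x])
--             else:
--                 mutated_meas.append(['I','Z'])
--         mutated_meas = list(itertools.product(*mutated_meas))
--         return mutated_meas
-- ===== SOURCE B (Python) =====
-- def mutate_measurement_basis(meas):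
--     """I and Z measurement basis correspond to the same logical circuit"""
--     if all(x != 'I' for x in meas):
--         return [meas]
--     k = sum(1 for x in meas if x == 'I')
--     out = []
--     for mask in range(2 ** k):
--         row = []
--         j = 0
--         for x in meas:
--             if x != 'I':
--                 row.append(x)
--             else:
--                 row.append('I' if (mask >> (k - 1 - j)) & 1 == 0 else 'Z')
--                 j += 1
--         out.append(tuple(row))
--     return out
-- ===== Notes on version B (the rewrite author's own statement) =====
-- stated objective: alternative
-- what changed: B replaces building per-position option lists and taking itertools.product with a direct bitmask enumeration: it counts the k 'I' positions and for each mask in range(2**k) fills the I slots from the mask's bits (first I = most significant bit).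
import Mathlib
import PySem

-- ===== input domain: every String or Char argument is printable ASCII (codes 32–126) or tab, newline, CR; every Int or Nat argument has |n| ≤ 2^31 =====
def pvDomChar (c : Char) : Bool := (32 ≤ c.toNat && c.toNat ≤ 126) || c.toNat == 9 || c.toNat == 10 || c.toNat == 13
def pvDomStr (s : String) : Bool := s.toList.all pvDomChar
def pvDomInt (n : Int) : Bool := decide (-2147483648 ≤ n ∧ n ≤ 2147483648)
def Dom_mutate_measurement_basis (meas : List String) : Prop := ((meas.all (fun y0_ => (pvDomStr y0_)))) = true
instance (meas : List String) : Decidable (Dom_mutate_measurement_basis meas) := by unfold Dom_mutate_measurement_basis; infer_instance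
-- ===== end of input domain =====

-- B enumerates the I/Z substitutions directly by a bitmask counter instead of building
-- per-position option lists and taking itertools.product; objective: alternative (same cost).

-- ===== PORT A =====
-- hand port of itertools.product(*lists): exact, first list varies slowest (last fastest)
def pyProduct : List (List String) → List (List String)
  | [] => [[]]
  | l :: ls => l.flatMap (fun x => (pyProduct ls).map (fun t => x :: t))

def mutate_measurement_basis (meas : List String) : List (List String) :=
  if meas.all (fun x => x != "I") then [meas]
  else
    let mutated := meas.foldl
      (fun acc x => if x != "I" then acc ++ [[x]] else acc ++ [["I", "Z"]]) []
    pyProduct mutated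

-- ===== PORT B =====
-- one step of Source B's inner loop: acc = (row built so far, number of 'I' positions consumed)
def altRowStep (k : Nat) (mask : Nat) (acc : List String × Nat) (x : String) : List String × Nat :=
  if x != "I" then (acc.1 ++ [x], acc.2)
  else (acc.1 ++ [if (mask >>> (k - 1 - acc.2)) % 2 == 0 then "I" else "Z"], acc.2 + 1)

def mutate_measurement_basis_alt (meas : List String) : List (List String) :=
  if meas.all (fun x => x != "I") then [meas]
  else
    -- k = sum(1 for x in meas if x == 'I'); range(2**k) ported as List.range (2^k) (k ≥ 0, exact)
    let k := (meas.filter (fun x => x == "I")).length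
    (List.range (2 ^ k)).map (fun mask => (meas.foldl (altRowStep k mask) ([], 0)).1)

-- ===== PRECONDITION & SPEC =====
def Spec_mutate_measurement_basis (meas : List String) (out : List (List String)) : Prop := out = mutate_measurement_basis_alt meas
instance (meas : List String) (out : List (List String)) : Decidable (Spec_mutate_measurement_basis meas out) := by unfold Spec_mutate_measurement_basis; infer_instance

-- ===== CLAIM (what is proved, stated in full; the proofs are below) =====
def Claim_equal_mutate_measurement_basis : Prop := ∀ (meas : List String), Dom_mutate_measurement_basis meas → Spec_mutate_measurement_basis meas (mutate_measurement_basis meas)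

-- ===== LEMMAS AND PROOFS =====

-- number of 'I' entries
def cntI (xs : List String) : Nat := (xs.filter (fun x => x == "I")).length

-- B's row with the running counter j made explicit (mirrors the foldl state)
def fill2 : List String → Nat → Nat → Nat → List String
  | [], _, _, _ => []
  | x :: xs, k, j, mask =>
    if x != "I" then x :: fill2 xs k j mask
    else (if (mask >>> (k - 1 - j)) % 2 == 0 then "I" else "Z") :: fill2 xs k (j + 1) mask

-- B's row with the counter folded into k (always the top remaining bit)
def fillK : List String → Nat → Nat → List String
  | [], _, _ => []
  | x :: xs, k, mask =>
    if x != "I" then x :: fillK xs k mask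
    else (if (mask >>> (k - 1)) % 2 == 0 then "I" else "Z") :: fillK xs (k - 1) mask

-- A's per-position option lists
def optsOf (xs : List String) : List (List String) :=
  xs.map (fun x => if x != "I" then [x] else ["I", "Z"])

theorem foldl_opts (xs : List String) (acc : List (List String)) :
    xs.foldl (fun acc x => if x != "I" then acc ++ [[x]] else acc ++ [["I", "Z"]]) acc
      = acc ++ optsOf xs := by
  induction xs generalizing acc with
  | nil => simp [optsOf]
  | cons x xs ih =>
    rw [List.foldl_cons, ih]
    by_cases h : x = "I" <;> simp [optsOf, h]

theorem foldl_altRow (xs : List String) (k mask : Nat) (acc : List String) (j : Nat) :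
    (xs.foldl (altRowStep k mask) (acc, j)).1 = acc ++ fill2 xs k j mask := by
  induction xs generalizing acc j with
  | nil => simp [fill2]
  | cons x xs ih =>
    by_cases h : x = "I" <;> simp [altRowStep, fill2, h, ih]

theorem fill2_eq_fillK (xs : List String) (k j mask : Nat) :
    fill2 xs k j mask = fillK xs (k - j) mask := by
  induction xs generalizing j with
  | nil => simp [fill2, fillK]
  | cons x xs ih =>
    by_cases h : x = "I" <;>
      simp [fill2, fillK, h, ih, Nat.sub_sub, Nat.add_comm]

theorem fillK_congr (xs : List String) (k m m' : Nat)
    (hc : cntI xs ≤ k)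
    (hb : ∀ i, i < k → (m >>> i) % 2 = (m' >>> i) % 2) :
    fillK xs k m = fillK xs k m' := by
  induction xs generalizing k with
  | nil => simp [fillK]
  | cons x xs ih =>
    by_cases h : x = "I"
    · have hk : 1 ≤ k := by
        have : cntI (x :: xs) = cntI xs + 1 := by simp [cntI, h]
        omega
      have hc' : cntI xs ≤ k - 1 := by
        have : cntI (x :: xs) = cntI xs + 1 := by simp [cntI, h]
        omega
      have hhead := hb (k - 1) (by omega)
      simp only [fillK, h, bne_self_eq_false, Bool.false_eq_true, if_false]
      rw [hhead, ih (k - 1) hc' (fun i hi => hb i (by omega))]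
    · have hc' : cntI xs ≤ k := by
        have : cntI (x :: xs) = cntI xs := by simp [cntI, h]
        omega
      simp [fillK, h, ih k hc' hb]

theorem shift_two_pow_add (k m i : Nat) (hi : i < k) :
    ((2 ^ k + m) >>> i) % 2 = (m >>> i) % 2 := by
  have h1 : 2 ^ k + m = m + 2 ^ (k - i - 1) * 2 * 2 ^ i := by
    have : 2 ^ (k - i - 1) * 2 * 2 ^ i = 2 ^ k := by
      rw [mul_assoc, ← pow_succ']
      rw [← pow_add]
      congr 1
      omega
    omega
  rw [Nat.shiftRight_eq_div_pow, Nat.shiftRight_eq_div_pow, h1,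
    Nat.add_mul_div_right _ _ (Nat.two_pow_pos i),
    Nat.add_mul_mod_self_right]

theorem fillK_high (xs : List String) (k m : Nat) (hc : cntI xs ≤ k) :
    fillK xs k (2 ^ k + m) = fillK xs k m :=
  fillK_congr xs k _ m hc (fun i hi => shift_two_pow_add k m i hi)

theorem product_eq_range (xs : List String) :
    pyProduct (optsOf xs)
      = (List.range (2 ^ cntI xs)).map (fun m => fillK xs (cntI xs) m) := by
  induction xs with
  | nil => simp [optsOf, pyProduct, cntI, fillK]
  | cons x xs ih =>
    by_cases h : x = "I"
    · subst h
      have hb : (("I" : String) != "I") = false := by simp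
      have hcnt : cntI ("I" :: xs) = cntI xs + 1 := by simp [cntI]
      set k := cntI xs with hk
      have hsplit : List.range (2 ^ (k + 1))
          = List.range (2 ^ k) ++ (List.range (2 ^ k)).map (fun m => 2 ^ k + m) := by
        have h2 : 2 ^ (k + 1) = 2 ^ k + 2 ^ k := by ring
        rw [h2, List.range_add]
      rw [hcnt, hsplit]
      simp only [optsOf, List.map_cons, hb, Bool.false_eq_true, if_false]
      simp only [pyProduct, List.flatMap_cons, List.flatMap_nil, List.append_nil]
      simp only [optsOf] at ih
      rw [ih, List.map_append]
      congr 1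
      · -- low half: top bit 0 → 'I'
        rw [List.map_map]
        apply List.map_congr_left
        intro m hm
        rw [List.mem_range] at hm
        have h0 : (m >>> k) % 2 = 0 := by
          rw [Nat.shiftRight_eq_div_pow, Nat.div_eq_of_lt hm]
        simp [fillK, h0]
      · -- high half: top bit 1 → 'Z', low bits unchanged
        rw [List.map_map, List.map_map]
        apply List.map_congr_left
        intro m hm
        rw [List.mem_range] at hm
        have h1 : ((2 ^ k + m) >>> k) % 2 = 1 := by
          rw [Nat.shiftRight_eq_div_pow]
          have hd : (2 ^ k + m) / 2 ^ k = 1 + m / 2 ^ k := by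
            rw [Nat.add_comm (2 ^ k) m, Nat.add_div_right _ (Nat.two_pow_pos k),
              Nat.div_eq_of_lt hm]
          rw [hd, Nat.div_eq_of_lt hm]
        have h2 : fillK xs k (2 ^ k + m) = fillK xs k m := fillK_high xs k m (le_refl _)
        simp [fillK, h1, h2]
    · have hb : (x != "I") = true := by simp [h]
      have hcnt : cntI (x :: xs) = cntI xs := by simp [cntI, h]
      rw [hcnt]
      simp only [optsOf, List.map_cons, hb, if_true]
      simp only [pyProduct, List.flatMap_cons, List.flatMap_nil, List.append_nil]
      simp only [optsOf] at ih
      rw [ih, List.map_map]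
      apply List.map_congr_left
      intro m _
      simp [fillK, hb]

-- ===== VERDICT (by name: the statement is the Claim_ definition above) =====
theorem mutate_measurement_basis_spec : Claim_equal_mutate_measurement_basis := by
  intro meas _
  unfold Spec_mutate_measurement_basis mutate_measurement_basis mutate_measurement_basis_alt
  by_cases hg : meas.all (fun x => x != "I")
  · simp [hg]
  · rw [if_neg hg, if_neg hg]
    simp only
    rw [foldl_opts meas [], List.nil_append, product_eq_range]
    apply List.map_congr_left
    intro m _
    rw [foldl_altRow meas _ m [] 0, List.nil_append, fill2_eq_fillK, Nat.sub_zero]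
    rfl
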